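-- pv_equiv track=rewrite | github.com/BritoAlv/cs | competitive_programming/R1500/Tandem Repeats?.py | get_tandem
-- ===== SOURCE A (Python) =====
-- def largest_consecutive(arr):
--     ans = 0
--     n = len(arr)
--     i = 0
--     while (i < n):
--         start = i
--         end = i
--         while end + 1 < n and arr[end + 1] == arr[end] + 1:
--             end += 1
--         ans = max(ans, end - start + 1)
--         i = end + 1
--     return ans
--
-- def get_tandem(a):
--     ans = 0
--     for dist in range(2, len(a) + 1, 2):
--         arr = []
--         d = dist // 2
--         for l in range(0, len(a)):
--             r = l + d
--             if r < len(a) and ((a[l] == a[r]) or ('?' in [a[l], a[r]])):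
--                 arr.append(l)
--         larg = largest_consecutive(arr)
--         if larg >= d:
--             ans = d
--     return 2 * ans
-- ===== SOURCE B (Python) =====
-- def get_tandem(a):
--     n = len(a)
--     for d in range(n // 2, 0, -1):
--         for i in range(n - 2 * d + 1):
--             for j in range(d):
--                 x = a[i + j]
--                 y = a[i + d + j]
--                 if x != y and x != '?' and y != '?':
--                     break
--             else:
--                 return 2 * d
--     return 0
-- ===== Notes on version B (the rewrite author's own statement) =====
-- stated objective: alternative
-- what changed: Replaces A's per-distance matching-index list plus the longest-consecutive-run helper with a direct definition-driven search: for each candidate half-length d from largest down, test each window of length 2d by comparing its two halves character-wise (with '?' wildcards) and return the first (hence largest) square length found.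
import Mathlib
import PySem

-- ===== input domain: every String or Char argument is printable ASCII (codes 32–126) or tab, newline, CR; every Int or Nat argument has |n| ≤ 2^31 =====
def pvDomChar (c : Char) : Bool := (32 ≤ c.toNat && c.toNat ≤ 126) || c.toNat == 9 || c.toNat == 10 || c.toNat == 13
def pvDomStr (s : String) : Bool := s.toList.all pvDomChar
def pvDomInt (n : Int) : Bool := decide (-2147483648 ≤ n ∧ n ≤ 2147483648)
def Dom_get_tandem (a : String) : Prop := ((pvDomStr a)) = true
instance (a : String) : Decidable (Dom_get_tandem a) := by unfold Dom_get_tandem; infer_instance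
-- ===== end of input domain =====

-- B drops A's matching-index list and longest-consecutive-run helper and instead searches
-- candidate half-lengths from largest down, directly comparing the two halves of each window
-- (with '?' wildcards) and returning the first square length found — an alternative algorithm.


-- ===== PORT A =====
-- the test 'r < len(a) and (a[l] == a[r] or '?' in [a[l], a[r]])'
def pvMatch (s : List Char) (d l : Nat) : Bool :=
  decide (l + d < s.length) &&
    (s.getD l ' ' == s.getD (l + d) ' ' || s.getD l ' ' == '?' || s.getD (l + d) ' ' == '?')

-- inner while loop of largest_consecutive: extend `end` while arr[end+1] == arr[end] + 1;
-- returns (end - start, remaining list after `end`)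
def pvLcInner : Nat → List Nat → Nat × List Nat
  | _, [] => (0, [])
  | cur, y :: ys =>
    if y = cur + 1 then
      let p := pvLcInner y ys
      (p.1 + 1, p.2)
    else (0, y :: ys)

theorem pvLcInner_length : ∀ (cur : Nat) (xs : List Nat), (pvLcInner cur xs).2.length ≤ xs.length := by
  intro cur xs
  induction xs generalizing cur with
  | nil => simp [pvLcInner]
  | cons y ys ih =>
    simp only [pvLcInner]
    split
    · exact Nat.le_trans (ih y) (Nat.le_succ _)
    · simp

-- outer while loop of largest_consecutive, state = (remaining list, ans)
def pvLcAux : List Nat → Nat → Nat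
  | [], ans => ans
  | x :: xs, ans => pvLcAux (pvLcInner x xs).2 (max ans ((pvLcInner x xs).1 + 1))
termination_by xs => xs.length
decreasing_by
  have := pvLcInner_length x xs
  simp
  omega

def largest_consecutive (arr : List Nat) : Nat := pvLcAux arr 0

def get_tandem (a : String) : Int :=
  let s := a.toList
  2 * (PySem.List.pyRange 2 ((s.length : Int) + 1) 2).foldl (fun ans dist =>
    let d := (PySem.Int.floordiv dist 2).toNat
    let arr := (List.range s.length).foldl (fun arr l => if pvMatch s d l then arr ++ [l] else arr) []
    let larg := largest_consecutive arr
    if d ≤ larg then (d : Int) else ans) 0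

-- ===== PORT B =====
-- the inner 'for j in range(d): ... break / else: return' half-comparison: the window at i is a
-- square iff every j < d satisfies x == y or x == '?' or y == '?'; indices are in range in
-- Python (i ≤ n - 2d, j < d), so `getD` is exact here
def pvWin (s : List Char) (d i : Nat) : Bool :=
  (List.range d).all fun j =>
    s.getD (i + j) ' ' == s.getD (i + d + j) ' ' || s.getD (i + j) ' ' == '?' ||
      s.getD (i + d + j) ' ' == '?'

-- the inner 'for i in range(n - 2*d + 1)' loop with its early 'return'
def pvWindowOK (s : List Char) (d : Nat) : Bool :=
  (List.range (s.length - 2 * d + 1)).any (pvWin s d)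

-- the outer 'for d in range(n // 2, 0, -1)' loop with early return, then 'return 0'
def pvDesc (s : List Char) : Nat → Int
  | 0 => 0
  | d + 1 => if pvWindowOK s (d + 1) then 2 * ((d : Int) + 1) else pvDesc s d

def get_tandem_alt (a : String) : Int := pvDesc a.toList (a.toList.length / 2)

-- ===== PRECONDITION & SPEC =====
def Spec_get_tandem (a : String) (out : Int) : Prop := out = get_tandem_alt a
instance (a : String) (out : Int) : Decidable (Spec_get_tandem a out) := by unfold Spec_get_tandem; infer_instance

-- ===== CLAIM (what is proved, stated in full; the proofs are below) =====
def Claim_equal_get_tandem : Prop := ∀ (a : String), Dom_get_tandem a → Spec_get_tandem a (get_tandem a)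

-- ===== LEMMAS AND PROOFS =====

-- indices (from i) of the true entries of a boolean list
def pvIdx : Nat → List Bool → List Nat
  | _, [] => []
  | i, true :: bs => i :: pvIdx (i + 1) bs
  | i, false :: bs => pvIdx (i + 1) bs

-- length of the leading run of trues
def pvLead : List Bool → Nat
  | true :: bs => pvLead bs + 1
  | _ => 0

-- maximum run of trues, given a current run of length `run` just before the list
def pvM : Nat → List Bool → Nat
  | _, [] => 0
  | run, v :: bs => max (if v then run + 1 else 0) (pvM (if v then run + 1 else 0) bs)

theorem pvIdx_append : ∀ (bs : List Bool) (i : Nat) (v : Bool),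
    pvIdx i (bs ++ [v]) = pvIdx i bs ++ (if v then [i + bs.length] else []) := by
  intro bs
  induction bs with
  | nil => intro i v; cases v <;> simp [pvIdx]
  | cons b bs ih =>
    intro i v
    cases b <;> simp [pvIdx, ih (i + 1) v] <;> cases v <;>
      simp [Nat.add_assoc, Nat.add_comm 1 bs.length]

theorem pvFilter_range (p : Nat → Bool) (n : Nat) :
    (List.range n).filter p = pvIdx 0 ((List.range n).map p) := by
  induction n with
  | zero => simp [pvIdx]
  | succ n ih =>
    rw [List.range_succ, List.filter_append, List.map_append, List.map_singleton,
      pvIdx_append, ih]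
    simp [List.filter]
    cases p n <;> simp

theorem pvLcInner_far : ∀ (bs : List Bool) (j i : Nat), i + 1 < j →
    pvLcInner i (pvIdx j bs) = (0, pvIdx j bs) := by
  intro bs
  induction bs with
  | nil => intro j i h; simp [pvIdx, pvLcInner]
  | cons b bs ih =>
    intro j i h
    cases b
    · simpa [pvIdx] using ih (j + 1) i (by omega)
    · simp [pvIdx, pvLcInner]
      omega

theorem pvLcInner_idx : ∀ (bs : List Bool) (i : Nat),
    pvLcInner i (pvIdx (i + 1) bs) = (pvLead bs, pvIdx (i + 1 + pvLead bs) (bs.drop (pvLead bs))) := by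
  intro bs
  induction bs with
  | nil => intro i; simp [pvIdx, pvLead, pvLcInner]
  | cons b bs ih =>
    intro i
    cases b
    · have := pvLcInner_far bs (i + 2) i (by omega)
      simp [pvIdx, pvLead, this]
    · have h := ih (i + 1)
      have h2 : i + 1 + 1 + pvLead bs = i + 1 + (pvLead bs + 1) := by omega
      simp [pvIdx, pvLcInner, pvLead, h, h2]

theorem pvM_lead : ∀ (bs : List Bool) (r : Nat),
    max r (pvM r bs) = max (r + pvLead bs) (pvM 0 (bs.drop (pvLead bs))) := by
  intro bs
  induction bs with
  | nil => intro r; simp [pvM, pvLead]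
  | cons b bs ih =>
    intro r
    cases b
    · simp [pvM, pvLead]
    · have h := ih (r + 1)
      simp [pvM, pvLead] at h ⊢
      omega

theorem pvLcAux_idx : ∀ (k : Nat) (bs : List Bool), bs.length ≤ k → ∀ (i ans : Nat),
    pvLcAux (pvIdx i bs) ans = max ans (pvM 0 bs) := by
  intro k
  induction k with
  | zero =>
    intro bs h i ans
    have : bs = [] := List.eq_nil_of_length_eq_zero (by omega)
    simp [this, pvIdx, pvLcAux, pvM]
  | succ k ih =>
    intro bs h i ans
    cases bs with
    | nil => simp [pvIdx, pvLcAux, pvM]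
    | cons b bs =>
      cases b
      · have := ih bs (by simpa using h) (i + 1) ans
        simp [pvIdx, pvM, this]
      · simp only [pvIdx, pvLcAux, pvLcInner_idx]
        have hlen : (bs.drop (pvLead bs)).length ≤ k := by
          simp at h ⊢
          omega
        rw [ih _ hlen]
        have hm := pvM_lead bs 1
        simp [pvM] at hm ⊢
        omega

-- the leading trues really are true
theorem pvLead_prefix : ∀ (bs : List Bool) (j : Nat), j < pvLead bs → bs.getD j false = true := by
  intro bs
  induction bs with
  | nil => intro j h; simp [pvLead] at h
  | cons b bs ih =>
    intro j h
    cases b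
    · simp [pvLead] at h
    · cases j with
      | zero => simp
      | succ j => simp only [pvLead] at h; simpa using ih j (by omega)

theorem pvLead_le_length : ∀ (bs : List Bool), pvLead bs ≤ bs.length := by
  intro bs
  induction bs with
  | nil => simp [pvLead]
  | cons b bs ih => cases b <;> simp [pvLead] <;> omega

-- a window of trues starting at the front pushes the running count up by its length
theorem pvM_front : ∀ (bs : List Bool) (run d : Nat),
    d ≤ bs.length → (∀ j < d, bs.getD j false = true) →
    run + d ≤ max run (pvM run bs) := by
  intro bs
  induction bs with
  | nil =>
    intro run d h _
    simp at h
    simp [h, pvM]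
  | cons b bs ih =>
    intro run d h hw
    cases d with
    | zero => simp
    | succ d =>
      have hb : b = true := by simpa using hw 0 (by omega)
      subst hb
      have hw' : ∀ j < d, bs.getD j false = true := by
        intro j hj
        simpa using hw (j + 1) (by omega)
      have := ih (run + 1) d (by simpa using h) hw'
      simp [pvM] at this ⊢
      omega

-- any window of trues forces the max run that high
theorem pvM_of_window : ∀ (bs : List Bool) (i run d : Nat),
    i + d ≤ bs.length → (∀ j < d, bs.getD (i + j) false = true) →
    d ≤ pvM run bs := by
  intro bs
  induction bs with
  | nil => intro i run d h _; simp at h; simp [pvM]; omega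
  | cons b bs ih =>
    intro i run d h hw
    cases i with
    | zero =>
      cases d with
      | zero => simp
      | succ d =>
        have hb : b = true := by simpa using hw 0 (by omega)
        subst hb
        have := pvM_front (true :: bs) run (d + 1) (by simpa using h) (by simpa using hw)
        have hge : run + 1 ≤ pvM run (true :: bs) := by
          simp [pvM]
        omega
    | succ i =>
      have hw' : ∀ j < d, bs.getD (i + j) false = true := by
        intro j hj
        have := hw j hj
        simpa [Nat.succ_add] using this
      have := ih i (if b then run + 1 else 0) d (by simp at h; omega) hw'
      simp only [pvM]
      omega

-- conversely, a max run of length ≥ d ≥ 1 yields a window of trues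
theorem pvM_window : ∀ (N : Nat) (bs : List Bool), bs.length ≤ N → ∀ d, 1 ≤ d → d ≤ pvM 0 bs →
    ∃ i, i + d ≤ bs.length ∧ ∀ j < d, bs.getD (i + j) false = true := by
  intro N
  induction N with
  | zero =>
    intro bs h d hd hm
    have : bs = [] := List.eq_nil_of_length_eq_zero (by omega)
    subst this
    simp [pvM] at hm
    omega
  | succ N ih =>
    intro bs h d hd hm
    cases bs with
    | nil => simp [pvM] at hm; omega
    | cons b bs =>
      cases b
      · have hm' : d ≤ pvM 0 bs := by simpa [pvM] using hm
        obtain ⟨i, hlen, hw⟩ := ih bs (by simpa using h) d hd hm'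
        exact ⟨i + 1, by simp; omega, fun j hj => by simpa [Nat.succ_add] using hw j hj⟩
      · have hlead := pvM_lead bs 1
        have hm' : d ≤ max (1 + pvLead bs) (pvM 0 (bs.drop (pvLead bs))) := by
          simp [pvM] at hm hlead ⊢
          omega
        by_cases hc : d ≤ 1 + pvLead bs
        · refine ⟨0, by have := pvLead_le_length bs; simp; omega, ?_⟩
          intro j hj
          cases j with
          | zero => simp
          | succ j =>
            have : j < pvLead bs := by omega
            simpa using pvLead_prefix bs j this
        · have hm'' : d ≤ pvM 0 (bs.drop (pvLead bs)) := by omega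
          have hN : (bs.drop (pvLead bs)).length ≤ N := by
            simp at h ⊢
            omega
          obtain ⟨i, hlen, hw⟩ := ih _ hN d hd hm''
          refine ⟨1 + pvLead bs + i, ?_, ?_⟩
          · simp at hlen ⊢
            omega
          · intro j hj
            have hb : (bs.drop (pvLead bs)).getD (i + j) false = true := hw j hj
            have hidx : (bs.drop (pvLead bs))[i + j]? = bs[pvLead bs + (i + j)]? := by
              rw [List.getElem?_drop]
            have : bs.getD (pvLead bs + (i + j)) false = true := by
              simpa [List.getD, hidx] using hb
            have harr : 1 + pvLead bs + i + j = (pvLead bs + (i + j)) + 1 := by omega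
            rw [harr]
            simpa using this

-- the Boolean list whose runs A measures for a given distance d
theorem pvMatch_getD (s : List Char) (d i : Nat) (hi : i < s.length) :
    ((List.range s.length).map (pvMatch s d)).getD i false = pvMatch s d i := by
  have : ((List.range s.length).map (pvMatch s d))[i]? = some (pvMatch s d i) := by
    simp [hi]
  simp [List.getD, this]

-- per-distance agreement: 'max run ≥ d' iff some window's halves match
theorem pvQ_equiv (s : List Char) (d : Nat) (hd : 1 ≤ d) (hds : 2 * d ≤ s.length) :
    (d ≤ pvM 0 ((List.range s.length).map (pvMatch s d))) ↔ pvWindowOK s d = true := by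
  set bs := (List.range s.length).map (pvMatch s d) with hbs
  have hlen : bs.length = s.length := by simp [hbs]
  constructor
  · intro hm
    obtain ⟨i, hile, hw⟩ := pvM_window bs.length bs le_rfl d hd hm
    have hlast : pvMatch s d (i + (d - 1)) = true := by
      have := hw (d - 1) (by omega)
      rwa [pvMatch_getD s d _ (by omega)] at this
    have hbound : i + (d - 1) + d < s.length := by
      simp only [pvMatch, Bool.and_eq_true, decide_eq_true_eq] at hlast
      exact hlast.1
    simp only [pvWindowOK, List.any_eq_true, List.mem_range]
    refine ⟨i, by omega, ?_⟩
    simp only [pvWin, List.all_eq_true, List.mem_range]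
    intro j hj
    have := hw j hj
    rw [pvMatch_getD s d _ (by omega)] at this
    simp only [pvMatch, Bool.and_eq_true] at this
    have harr : i + d + j = i + j + d := by omega
    rw [harr]
    exact this.2
  · intro hok
    simp only [pvWindowOK, List.any_eq_true, List.mem_range] at hok
    obtain ⟨i, hi, hwin⟩ := hok
    simp only [pvWin, List.all_eq_true, List.mem_range] at hwin
    have hw : ∀ j < d, bs.getD (i + j) false = true := by
      intro j hj
      have hb : i + j < s.length := by omega
      rw [pvMatch_getD s d _ hb]
      simp only [pvMatch, Bool.and_eq_true, decide_eq_true_eq]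
      constructor
      · omega
      · have := hwin j hj
        have harr : i + d + j = i + j + d := by omega
        rwa [harr] at this
    have := pvM_of_window bs i 0 d (by omega) hw
    exact this

theorem pvLarg_eq (s : List Char) (d : Nat) :
    largest_consecutive ((List.range s.length).foldl
        (fun arr l => if pvMatch s d l then arr ++ [l] else arr) []) =
      pvM 0 ((List.range s.length).map (pvMatch s d)) := by
  rw [PySem.List.foldl_append_if_eq_filter, List.nil_append, pvFilter_range,
    largest_consecutive, pvLcAux_idx ((List.range s.length).map (pvMatch s d)).length _ le_rfl]
  simp

-- A's ascending overwrite-fold (its step written exactly as in get_tandem)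
-- equals B's descending first-hit search
theorem pvFold_desc (s : List Char) : ∀ (m : Nat), m ≤ s.length / 2 →
    2 * (List.range m).foldl (fun (ans : Int) (k : Nat) =>
      let d := (PySem.Int.floordiv (2 + 2 * (k : Int)) 2).toNat
      let arr := (List.range s.length).foldl (fun arr l => if pvMatch s d l then arr ++ [l] else arr) []
      let larg := largest_consecutive arr
      if d ≤ larg then (d : Int) else ans) 0 = pvDesc s m := by
  intro m
  induction m with
  | zero => intro _; simp [pvDesc]
  | succ m ih =>
    intro hm
    rw [List.range_succ, List.foldl_append]
    simp only [List.foldl_cons, List.foldl_nil, pvDesc]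
    have hd : (PySem.Int.floordiv (2 + 2 * (m : Int)) 2).toNat = m + 1 := by
      rw [PySem.Int.floordiv_eq_ediv_of_pos (by norm_num)]
      omega
    rw [hd, pvLarg_eq s (m + 1)]
    by_cases hq : (m + 1) ≤ pvM 0 ((List.range s.length).map (pvMatch s (m + 1)))
    · rw [if_pos hq, if_pos ((pvQ_equiv s (m + 1) (by omega) (by omega)).mp hq)]
      push_cast
      ring
    · rw [if_neg hq, if_neg (by
        intro hok
        exact hq ((pvQ_equiv s (m + 1) (by omega) (by omega)).mpr hok))]
      exact ih (by omega)

theorem pyRangeA (n : Nat) :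
    PySem.List.pyRange 2 ((n : Int) + 1) 2 = (List.range (n / 2)).map (fun k : Nat => 2 + 2 * (k : Int)) := by
  rw [PySem.List.pyRange_of_pos _ _ (by norm_num)]
  have : (if (2 : Int) < (n : Int) + 1 then (((n : Int) + 1 - 2 + 2 - 1) / 2).toNat else 0) = n / 2 := by
    split <;> omega
  rw [this]

theorem pvMain (a : String) : get_tandem a = get_tandem_alt a := by
  have h := pvFold_desc a.toList (a.toList.length / 2) le_rfl
  simp only [get_tandem, get_tandem_alt]
  rw [pyRangeA, List.foldl_map]
  exact h

-- ===== VERDICT (by name: the statement is the Claim_ definition above) =====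
theorem get_tandem_spec : Claim_equal_get_tandem := by
  intro a _
  unfold Spec_get_tandem
  exact pvMain a
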